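/- GENERATED by mk_final_copies.py from the proof of the farm's unit `start_decoder.R19` (farm:start_decoder.R19.1: Lemmas.lean) as the
   re-elaboration sweep compiled it — do not edit. -/
import Vorbis.Spec.StartDecoderB

/-!
  Pure lemmas of unit `start_decoder.R19` (no machine state): the success point `Done` and the common part `Frame` are carried over
  the segment's stores — pushes / a callee's frame below the steady stack pointer, and the dword `first_audio_page_offset`
  (`[f + 80, f + 84)`, a decode-time hole of `*f` that no clause of the invariant reads).
-/

open X86 X86.User Asan Vorbis Vorbis.Spec Vorbis.Spec.StartDecoder

namespace Vorbis.Spec.start_decoder_R19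

/-- The footprint of segment R19 relative to its entry state: a window `[lo, hi)` of the stack (below the steady stack pointer)
and the dword `first_audio_page_offset` of `*f`. -/
def R19_spans (lo hi f : Nat) : List Span := [⟨lo, hi⟩, ⟨f + 80, f + 84⟩]

/-- **SD.12 over the stores of R19**: `Late`, T1 and the final test in `mem`; `mem'` differs from `mem` in a stack window that does
not meet `*f` and in `[f + 80, f + 84)`. Every group is carried by its two-address frame lemma; the arena's blocks are kept
because `*f` lies outside the arena's buffer (`objOut`) and the arena is off the stack. -/
theorem R19_done_carry {g : Ghost} {A9 A10 : Arena} {A : Arena × List Obj} {mem mem' : Mem} {lo hi : Nat}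
    (hlate : Late g 12 A9 A10 A mem) (ht : T1 mem g.f) (hfin : FinalTest mem g.f)
    (hout : g.f + Off.sizeof.stb_vorbis ≤ A.1.B ∨ A.1.B + A.1.L ≤ g.f)
    (hstk : 0x700000 ≤ lo ∧ hi ≤ 0x800000)
    (hoff : hi ≤ g.f ∨ g.f + 1808 ≤ lo)
    (hs : Mem.SameExcept (R19_spans lo hi g.f) mem mem') :
    Done g.len g.f (g.Live A) A mem' := by
  have hobr := hlate.bits.OBR
  simp only [voff] at hobr hout
  obtain ⟨hob1, hob2⟩ := hobr
  -- `*f` reads the same except the stored dword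
  have he : ObjEq [(0, 80), (84, 1808)] mem g.f mem' g.f := by
    apply ObjEq.of_sameExcept hs
    · intro w hw
      simp only [List.mem_cons, List.mem_nil_iff, or_false] at hw
      rcases hw with rfl | rfl <;> simp only [] <;> omega
    · intro w hw s hsp
      simp only [R19_spans, List.mem_cons, List.mem_nil_iff, or_false] at hw hsp
      rcases hw with rfl | rfl <;> rcases hsp with rfl | rfl <;> simp only [] <;> omega
  -- the shadow is untouched
  have hsh : Mem.EqOn 0xC00000 0xE00000 mem mem' := by
    apply hs.eqOn
    intro w hw
    simp only [R19_spans, List.mem_cons, List.mem_nil_iff, or_false] at hw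
    rcases hw with rfl | rfl <;> simp only [] <;> omega
  -- every block of the arena is kept
  have hkeptA : AllKept A.1.Blk mem mem' := by
    apply AllKept.of_sameExcept hlate.arena.blkOK hs
    intro B hB w hw
    have hin := arena_inside hlate.arena hB
    have hst := hlate.arena.blk_off_stack hB
    simp only [R19_spans, List.mem_cons, List.mem_nil_iff, or_false] at hw
    rcases hw with rfl | rfl <;> simp only [] <;> omega
  have hk9 : ∀ B, A9.Blk B → B.Kept mem mem' := fun B hB => hkeptA B (hlate.own.up9 B hB)
  have hC : stb_vorbis.channels mem g.f ≤ 16 := hlate.header.HD1.2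
  -- the groups
  have hheader : HeaderOK mem' g.f := hlate.header.transfer (he.sub (by decide))
  have hmode : ModeOK mem' g.f := hlate.mode.transfer (he.sub (by decide))
  have hcfg : Own 9 A9.Blk mem' g.f := by
    apply hlate.own.cfg.frame _ hk9
    apply he.sub
    have h9 : Mid.hi 9 = 868 := by decide
    intro w hw
    simp only [Own.winsAt, h9, List.mem_cons, List.mem_nil_iff, or_false] at hw
    rcases hw with rfl | rfl | rfl
    · exact ⟨(0, 80), by decide, by decide, by decide⟩
    · exact ⟨(0, 80), by decide, by decide, by decide⟩
    · exact ⟨(84, 1808), by decide, by decide, by decide⟩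
  have hm6 : Mdct.M6OK (Since A9 A10) mem' g.f :=
    hlate.own.m6.transfer (he.sub (by decide)) hC (fun _ _ hb => hb)
  have hmdct : Mdct.MdctOK (Since A10 A.1) mem' g.f :=
    hlate.own.mdct.transfer (he.sub (by decide)) (fun B hR => hkeptA B (hlate.own.mdct.reads_blk hR).1) (fun _ _ hb => hb)
  have hfl := hlate.own.cfg.floor (by omega)
  have hfy : FY1 (Since A9 A10) mem' g.f := by
    have hkept := hk9 _ hfl.FL2
    apply hlate.own.fy.transfer_of_eq _ _ _ _ _ (fun _ _ hb => hb)
    · simp only [vacc, voff]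
      exact he.i32 4 (by decide)
    · intro c hc
      simp only [vacc, voff]
      rw [Nat.add_assoc g.f]
      exact he.u64 (1264 + 8 * c) (InWins.of_mem (84, 1808) (by decide) (by simp only []; omega) (by simp only []; omega))
    · simp only [vacc, voff]
      exact he.i32 176 (by decide)
    · simp only [vacc, voff]
      exact he.u64 312 (by decide)
    · intro i hi
      have hg : IsFloor mem g.f (stb_vorbis.floor_config_at mem g.f i) := IsFloor.of_lt hi
      have hek := hfl.toFloorShape.elem_kept hg hkept
      have hin := hek.inside
      simp only [] at hin
      exact Floor1.same_values hek.same hin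
  have hown : OwnAll A9 A10 A.1 mem' g.f := ⟨hlate.own.ext9, hlate.own.ext10, hcfg, hm6, hfy, hmdct⟩
  -- T1 and the final test
  have hres := hlate.own.cfg.residue (by omega)
  have ht' : T1 mem' g.f :=
    ht.transfer (he.sub (by decide)) hres.R1.2 (fun B hR => hk9 B (hres.owns_blk (T1.Reads.owned hR)))
  have hfin' : FinalTest mem' g.f := by
    obtain ⟨h1, h2⟩ := hfin
    have e1 : stb_vorbis.setup_offset mem' g.f = stb_vorbis.setup_offset mem g.f := by
      simp only [vacc, voff]
      exact he.i32 128 (by decide)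
    have e2 : tmr mem' g.f = tmr mem g.f := by
      simp only [tmr, vacc, voff]
      exact he.u32 12 (by decide)
    have e3 : stb_vorbis.temp_offset mem' g.f = stb_vorbis.temp_offset mem g.f := by
      simp only [vacc, voff]
      exact he.i32 132 (by decide)
    have e4 : stb_vorbis.alloc.alloc_buffer_length_in_bytes mem' g.f = stb_vorbis.alloc.alloc_buffer_length_in_bytes mem g.f := by
      simp only [vacc, voff]
      exact he.i32 120 (by decide)
    exact ⟨by rw [e1, e2, e3]; exact h1, by rw [e3, e4]; exact h2⟩
  -- the scalars
  have hfirst : stb_vorbis.first_decode mem' g.f = 1 := by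
    have e : stb_vorbis.first_decode mem' g.f = stb_vorbis.first_decode mem g.f := by
      simp only [vacc, voff]
      exact he.u8 1749 (by decide)
    rw [e]
    exact hlate.first
  have hdisc : stb_vorbis.discard_samples_deferred mem' g.f = 0 := by
    have e : stb_vorbis.discard_samples_deferred mem' g.f = stb_vorbis.discard_samples_deferred mem g.f := by
      simp only [vacc, voff]
      exact he.i32 1784 (by decide)
    rw [e]
    exact hlate.discard0
  have hm7 : stb_vorbis.previous_length mem' g.f = 0 := by
    have e : stb_vorbis.previous_length mem' g.f = stb_vorbis.previous_length mem g.f := by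
      simp only [vacc, voff]
      exact he.i32 1256 (by decide)
    rw [e]
    exact hlate.m7
  -- the arena layer and the bit reader
  have harena : ArenaOK A.1 A.2 mem' g.f := by
    apply hlate.arena.frame (by simp only [voff]; omega)
    simp only [voff]
    apply hs.eqOn
    intro w hw
    simp only [R19_spans, List.mem_cons, List.mem_nil_iff, or_false] at hw
    rcases hw with rfl | rfl <;> simp only [] <;> omega
  have hbits : Bits (g.Blk A) g.len mem' g.f := by
    apply hlate.bits.frame_fields
    apply Bits.SameFields.of_sameExcept hs
    all_goals
      intro w hw
      simp only [R19_spans, List.mem_cons, List.mem_nil_iff, or_false] at hw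
      rcases hw with rfl | rfl <;> simp only [] <;> omega
  -- SD.12 (the proof of `Late.done`, over the carried parts)
  have hc : ConfigOK (g.Blk A) mem' g.f := hown.config (fun B hB => runBlk_setup hB) hheader hmode ht'
  have hw : W1 mem' g.f := W1.of_zero hdisc (HD3.hd3v hheader.HD3).le
  exact ⟨hlate.env.eqOn hsh, Real.VorbisOK.of_config hc hbits (Mdct.M7Range.of_zero hm7) hw, harena, hlate.noTemps, hfin', hfirst,
    ⟨A9, A10, hown⟩⟩

/-- **Where `*f` is, seen from start_decoder's frame**: `*f` lies inside ONE live object (`Hand.obj`), which is a stack object of a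
CALLER's protected frame — above the return-address slot (`Frame.callers`) — or an object off the stack region. -/
theorem R19_obj_place {u₀ : State} {g : Ghost} {pc : Word} {A : Arena × List Obj} {v : State}
    (hfr : Frame u₀ g pc A v) (hhand : g.Hand A) :
    g.RA + 8 ≤ g.f ∨ g.f + 1808 ≤ 0x700000 ∨ 0x800000 ≤ g.f := by
  obtain ⟨o, ho, h1, h2⟩ := hhand.obj
  simp only [voff] at h2
  obtain ⟨hra8, _, _⟩ := hfr.ra
  rcases List.mem_append.mp ho with hstack | hoth
  · unfold stackObjs at hstack
    obtain ⟨bF, hbF, hin⟩ := List.mem_flatMap.mp hstack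
    have hmem : bF ∈ g.frames' := List.mem_cons_of_mem _ hbF
    obtain ⟨k1, k2, _, _, _⟩ := hfr.shadow.stack.active bF hmem
    have hgran := FrameLayout.objsAt_gran k1 k2 hin
    have hc := hfr.callers bF hbF
    have hglo : o.gLo = o.base / 8 := rfl
    left
    omega
  · have hoffs := hfr.shadow.off o hoth
    unfold OffStack at hoffs
    right
    omega

/-- **The exit of R19**: a state `w` at the epilogue `0x113b22` with the steady stack pointer, eax = 1, whose memory differs from the
entry state's in a stack window below the steady stack pointer and in `first_audio_page_offset` only, satisfies `AtERR` with
`Done` (SD.12). -/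
theorem R19_exit {u₀ : State} {g : Ghost} {A9 A10 : Arena} {A : Arena × List Obj} {v w : State} {lo hi : Nat}
    (hb : BodyR19 u₀ g A9 A10 A v)
    (hrip : w.rip = pc_ERR) (hrsp : w.reg .rsp = addr g.R) (hcode : CodeOK u₀ w.mem) (hinv : abiInv w)
    (hrax : (w.reg .rax).toNat % 2 ^ 32 = 1)
    (hlo : g.RA - 1888 ≤ lo) (hhi : hi ≤ g.R)
    (hs : Mem.SameExcept (R19_spans lo hi g.f) v.mem w.mem) : AtERR u₀ g w := by
  obtain ⟨hfr, hhand, hlate, hrbp, htemp, hfinal⟩ := hb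
  have hplace := R19_obj_place hfr hhand
  obtain ⟨hra8, hralo, hrahi⟩ := hfr.ra
  obtain ⟨hR, hR8⟩ := hfr.r_eq
  simp only [depth, steady] at hralo hR
  have hobr := hlate.bits.OBR
  simp only [voff] at hobr
  obtain ⟨hob1, hob2⟩ := hobr
  have hdone : Done g.len g.f (g.Live A) A w.mem :=
    R19_done_carry hlate htemp hfinal hhand.objOut (by omega) (by omega) hs
  -- the frame's own slots `[R, RA + 8)` are untouched
  have heq : Mem.EqOn g.R (g.RA + 8) v.mem w.mem := by
    apply hs.eqOn
    intro s hsp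
    simp only [R19_spans, List.mem_cons, List.mem_nil_iff, or_false] at hsp
    rcases hsp with rfl | rfl <;> simp only [] <;> omega
  have hsh : ShadowUntouched v.mem w.mem := by
    apply hs.eqOn
    intro s hsp
    simp only [R19_spans, List.mem_cons, List.mem_nil_iff, or_false] at hsp
    rcases hsp with rfl | rfl <;> simp only [] <;> omega
  have hlog : Mem.EqOn 0x120640 0x120650 v.mem w.mem := by
    apply hs.eqOn
    intro s hsp
    simp only [R19_spans, List.mem_cons, List.mem_nil_iff, or_false] at hsp
    rcases hsp with rfl | rfl <;> simp only [] <;> omega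
  refine ⟨A, ⟨?_, hhand, Or.inr ⟨hrax, hdone⟩⟩⟩
  refine
    { entry := hfr.entry
      rip := hrip
      rsp := hrsp
      shadowIdx := ?_
      saved_rbx := ?_
      saved_rbp := ?_
      saved_r12 := ?_
      saved_r13 := ?_
      saved_r14 := ?_
      saved_r15 := ?_
      saved_ra := ?_
      code := hcode
      inv := hinv
      shadow := hfr.shadow.untouched hsh
      offText := hfr.offText
      ext := hfr.ext
      callers := hfr.callers
      sh7 := ?_
      same := ?_ }
  · rw [heq.u64 (g.R + 8) (by omega) (by omega) (by omega)]
    exact hfr.shadowIdx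
  · rw [heq.u64 (g.R + 0x598) (by omega) (by omega) (by omega)]
    exact hfr.saved_rbx
  · rw [heq.u64 (g.R + 0x5a0) (by omega) (by omega) (by omega)]
    exact hfr.saved_rbp
  · rw [heq.u64 (g.R + 0x5a8) (by omega) (by omega) (by omega)]
    exact hfr.saved_r12
  · rw [heq.u64 (g.R + 0x5b0) (by omega) (by omega) (by omega)]
    exact hfr.saved_r13
  · rw [heq.u64 (g.R + 0x5b8) (by omega) (by omega) (by omega)]
    exact hfr.saved_r14
  · rw [heq.u64 (g.R + 0x5c0) (by omega) (by omega) (by omega)]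
    exact hfr.saved_r15
  · rw [heq.u64 (g.R + 0x5c8) (by omega) (by omega) (by omega)]
    exact hfr.saved_ra
  · -- SH7: the table `log2_4` lies in the image's data, far below `*f` and the stack
    intro i hi16
    have e : (UInt64.ofNat (Vorbis.Globals.log2_4.beg + i)).toNat = 0x120640 + i := by
      have e0 : Vorbis.Globals.log2_4.beg = 0x120640 := rfl
      rw [e0, UInt64.toNat_ofNat']
      omega
    rw [hlog.readLE _ 1 (by omega) (by omega) (by omega)]
    exact hfr.sh7 i hi16
  · -- the footprint: the stack window lies in `[RA − 1888, RA)`, the dword inside `*f`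
    apply hfr.same.step_same hs
    intro s hsp a ha1 ha2
    simp only [R19_spans, List.mem_cons, List.mem_nil_iff, or_false] at hsp
    rcases hsp with rfl | rfl
    · refine ⟨⟨g.RA - depth, g.RA⟩, List.mem_cons_self, ?_, ?_⟩
      · simp only [depth]
        simp only [] at ha1
        omega
      · simp only [] at ha2 ⊢
        omega
    · refine ⟨(objBlock (g.e.reg .rdi).toNat).span, List.mem_cons_of_mem _ List.mem_cons_self, ?_, ?_⟩
      · show g.f ≤ a
        simp only [] at ha1
        omega
      · show a < g.f + Off.sizeof.stb_vorbis
        simp only [voff]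
        simp only [] at ha2
        omega

/-- **`*f` as a live block inside start_decoder** (the precondition `ObjLive` of stb_vorbis_get_file_offset at 0x116846): `*f` lies
inside one live object of the callers' frames or of `A.2` (`Hand.obj`); with the own frame pushed it still does. -/
theorem R19_objLive {g : Ghost} {A : Arena × List Obj} (hhand : g.Hand A) : ObjLive A.2 g.frames' g.f := by
  have hsub : ∀ o, o ∈ stackObjs g.frames ++ A.2 → o ∈ stackObjs g.frames' ++ A.2 := by
    intro o ho
    unfold Ghost.frames'
    rw [stackObjs_cons]
    rcases List.mem_append.mp ho with h1 | h2
    · exact List.mem_append_left _ (List.mem_append_right _ h1)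
    · exact List.mem_append_right _ h2
  exact (hhand.obj.mono hsub).blockLive

end Vorbis.Spec.start_decoder_R19
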